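-- pv_equiv track=rewrite | github.com/Gustavo-Mattos/Laboratorios-Python-Unicamp | lab10.py | averiguar
-- ===== SOURCE A (Python) =====
-- def averiguar(x, y):
--     for i in range(len(x) - len(y) + 1):
--         for j in range(len(x[0]) - len(y[0]) + 1):
--             certo = 0
--             for k in range(len(y)):
--                 if x[i + k][j:j+len(y[0])] == y[k]:
--                     certo += 1
--                     if certo == len(y):
--                         return 'Contido'
--                 else:
--                     break
--     return 'Nao contido'
-- ===== SOURCE B (Python) =====
-- def averiguar(x, y):
--     # Candidate-sieve: keep the list of all top-left positions and filter it
--     # once per pattern row, stopping as soon as no candidate survives.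
--     c = len(y[0])
--     cand = [(i, j) for i in range(len(x) - len(y) + 1)
--                    for j in range(len(x[0]) - c + 1)]
--     for k, row in enumerate(y):
--         cand = [(i, j) for (i, j) in cand if x[i + k][j:j + c] == row]
--         if not cand:
--             break
--     return 'Contido' if cand else 'Nao contido'
-- ===== Notes on version B (the rewrite author's own statement) =====
-- stated objective: alternative
-- what changed: A verifies every top-left position with a triple nested loop and a match counter; B builds the list of all candidate positions once and sieves it row-by-row of the pattern (one filtering pass per pattern row, stopping when no candidate survives).
import Mathlib
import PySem

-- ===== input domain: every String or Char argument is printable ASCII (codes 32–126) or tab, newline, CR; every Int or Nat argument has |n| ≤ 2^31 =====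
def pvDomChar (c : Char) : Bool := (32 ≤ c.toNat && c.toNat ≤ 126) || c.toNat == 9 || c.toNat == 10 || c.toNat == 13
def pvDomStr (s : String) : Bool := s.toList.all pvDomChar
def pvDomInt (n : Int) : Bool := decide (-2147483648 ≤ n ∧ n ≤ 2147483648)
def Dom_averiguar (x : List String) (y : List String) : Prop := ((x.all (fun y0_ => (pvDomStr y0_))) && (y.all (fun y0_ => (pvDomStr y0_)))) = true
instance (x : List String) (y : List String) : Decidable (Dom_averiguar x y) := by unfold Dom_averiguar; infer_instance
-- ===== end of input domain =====

-- B replaces A's triple nested scan (verify each position with a counter) by a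
-- candidate-sieve: the list of all top-left positions is filtered once per
-- pattern row, stopping when no candidate survives; same result ('alternative').

-- x[n] for an index the loops keep in range (Python would raise out of range; never hit under Pre_)
def pvGetS (xs : List String) (i : Int) : String := PySem.List.pyGetD xs i ""

-- ===== PORT A =====
-- inner 'for k in range(len(y))' loop with the 'certo' counter; returns true = 'return Contido'
def avK (x y : List String) (c : Int) (i j : Int) : List Int → Int → Bool
  | [], _ => false
  | k :: ks, certo =>
    if PySem.Str.slice (pvGetS x (i + k)) (some j) (some (j + c)) = pvGetS y k then
      if certo + 1 = (y.length : Int) then true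
      else avK x y c i j ks (certo + 1)
    else false

-- 'for j in range(...)' loop
def avJ (x y : List String) (c : Int) (i : Int) : List Int → Bool
  | [] => false
  | j :: js =>
    if avK x y c i j (PySem.List.pyRange 0 (y.length : Int) 1) 0 then true
    else avJ x y c i js

-- 'for i in range(...)' loop
def avI (x y : List String) (c : Int) : List Int → String
  | [] => "Nao contido"
  | i :: is =>
    if avJ x y c i (PySem.List.pyRange 0 (PySem.Str.len (pvGetS x 0) - c + 1) 1) then "Contido"
    else avI x y c is

def averiguar (x : List String) (y : List String) : String :=
  avI x y (PySem.Str.len (pvGetS y 0))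
    (PySem.List.pyRange 0 ((x.length : Int) - (y.length : Int) + 1) 1)

-- ===== PORT B =====
-- one filtering pass per pattern row ('for k, row in enumerate(y)' with the break)
def bSieve (x : List String) (c : Int) : Int → List String → List (Int × Int) → List (Int × Int)
  | _, [], cand => cand
  | k, row :: rest, cand =>
    let cand' := cand.filter
      (fun p => PySem.Str.slice (pvGetS x (p.1 + k)) (some p.2) (some (p.2 + c)) = row)
    if cand' = [] then cand' else bSieve x c (k + 1) rest cand'

def averiguar_alt (x : List String) (y : List String) : String :=
  let c := PySem.Str.len (pvGetS y 0)
  let cand := (PySem.List.pyRange 0 ((x.length : Int) - (y.length : Int) + 1) 1).flatMap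
    (fun i => (PySem.List.pyRange 0 (PySem.Str.len (pvGetS x 0) - c + 1) 1).map (fun j => (i, j)))
  let res := bSieve x c 0 y cand
  if res = [] then "Nao contido" else "Contido"

-- ===== PRECONDITION & SPEC =====
-- Pre_ excludes y = [], on which A raises IndexError (x[0] or y[0]).
def Pre_averiguar (x : List String) (y : List String) : Prop := y ≠ []
instance (x : List String) (y : List String) : Decidable (Pre_averiguar x y) := by
  unfold Pre_averiguar; infer_instance

def pvWitness_averiguar : List String × List String := (["ab", "ab"], ["b"])

def Spec_averiguar (x : List String) (y : List String) (out : String) : Prop := out = averiguar_alt x y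
instance (x : List String) (y : List String) (out : String) : Decidable (Spec_averiguar x y out) := by unfold Spec_averiguar; infer_instance

-- ===== CLAIM (what is proved, stated in full; the proofs are below) =====
def Claim_equal_averiguar : Prop := ∀ (x : List String) (y : List String), Dom_averiguar x y → Pre_averiguar x y → Spec_averiguar x y (averiguar x y)

-- ===== LEMMAS AND PROOFS =====

theorem pv_if_or (a b : Bool) :
    (if (a || b) = true then "Contido" else "Nao contido")
      = (if a = true then "Contido" else if b = true then "Contido" else "Nao contido") := by
  cases a <;> cases b <;> rfl

-- common characterisation: rows of y from index k all match at (i, j)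
def rowsFrom (x : List String) (c : Int) (i j : Int) : Int → List String → Bool
  | _, [] => true
  | k, row :: rest =>
    (PySem.Str.slice (pvGetS x (i + k)) (some j) (some (j + c)) = row)
      && rowsFrom x c i j (k + 1) rest

theorem bSieve_eq (x : List String) (c : Int) :
    ∀ (rows : List String) (k : Int) (cand : List (Int × Int)),
      bSieve x c k rows cand = cand.filter (fun p => rowsFrom x c p.1 p.2 k rows) := by
  intro rows
  induction rows with
  | nil => intro k cand; simp [bSieve, rowsFrom]
  | cons row rest ih =>
    intro k cand
    simp only [bSieve, rowsFrom]
    rw [← List.filter_filter, List.filter_comm]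
    split
    · next h => rw [h, List.filter_nil]
    · rw [ih, List.filter_comm]

theorem avK_eq (x y : List String) (c : Int) (i j : Int) :
    ∀ (k : Nat), k < y.length →
      avK x y c i j (PySem.List.pyRange (k : Int) (y.length : Int) 1) (k : Int)
        = rowsFrom x c i j (k : Int) (y.drop k) := by
  intro k hk
  induction hlen : y.length - k generalizing k with
  | zero => omega
  | succ n ih =>
    rw [PySem.List.pyRange_one_cons (by exact_mod_cast hk)]
    rw [List.drop_eq_getElem_cons hk]
    simp only [avK, rowsFrom]
    have hget : pvGetS y (k : Int) = y[k] := by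
      simp [pvGetS, PySem.List.pyGetD_natCast, List.getD_eq_getElem?_getD, hk]
    rw [hget]
    by_cases hm : PySem.Str.slice (pvGetS x (i + (k : Int))) (some j) (some (j + c)) = y[k]
    · simp only [hm, if_pos]
      by_cases hlast : k + 1 = y.length
      · have hcast : ((k : Int) + 1 = (y.length : Int)) := by exact_mod_cast hlast
        rw [if_pos hcast]
        have hdrop : y.drop (k + 1) = [] := List.drop_eq_nil_of_le (by omega)
        rw [hdrop]; simp [rowsFrom]
      · have hk1 : k + 1 < y.length := by omega
        have hne : ¬ ((k : Int) + 1 = (y.length : Int)) := by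
          intro hcontra; exact absurd (by exact_mod_cast hcontra) hlast
        rw [if_neg hne]
        have := ih (k + 1) hk1 (by omega)
        rw [show ((k : Int) + 1) = ((k + 1 : Nat) : Int) by push_cast; ring]
        exact this
    · simp [hm]

theorem avJ_eq (x y : List String) (c : Int) (i : Int) (hy : y ≠ []) :
    ∀ (js : List Int),
      avJ x y c i js = js.any (fun j => rowsFrom x c i j 0 y) := by
  intro js
  induction js with
  | nil => simp [avJ]
  | cons j js ih =>
    simp only [avJ, List.any_cons]
    have h0 := avK_eq x y c i j 0 (by cases y <;> simp_all)
    simp only [Nat.cast_zero, List.drop_zero] at h0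
    rw [h0]
    split <;> simp_all

theorem avI_eq (x y : List String) (c : Int) (hy : y ≠ []) :
    ∀ (is : List Int),
      avI x y c is
        = if is.any (fun i =>
            (PySem.List.pyRange 0 (PySem.Str.len (pvGetS x 0) - c + 1) 1).any
              (fun j => rowsFrom x c i j 0 y))
          then "Contido" else "Nao contido" := by
  intro is
  induction is with
  | nil => simp [avI]
  | cons i is ih =>
    simp only [avI, List.any_cons]
    rw [avJ_eq x y c i hy, ih]
    exact (pv_if_or _ _).symm

-- ===== VERDICT (by name: the statement is the Claim_ definition above) =====
theorem averiguar_spec : Claim_equal_averiguar := by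
  intro x y _ hy
  show averiguar x y = averiguar_alt x y
  rw [averiguar, avI_eq x y _ hy]
  simp only [averiguar_alt]
  rw [bSieve_eq]
  set c := PySem.Str.len (pvGetS y 0) with hc
  set rI := PySem.List.pyRange 0 ((x.length : Int) - (y.length : Int) + 1) 1 with hrI
  set rJ := PySem.List.pyRange 0 (PySem.Str.len (pvGetS x 0) - c + 1) 1 with hrJ
  by_cases hA : rI.any (fun i => rJ.any (fun j => rowsFrom x c i j 0 y))
  · rw [if_pos hA, if_neg]
    intro hnil
    simp only [List.any_eq_true] at hA
    obtain ⟨i, hi, j, hj, hij⟩ := hA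
    rw [List.filter_eq_nil_iff] at hnil
    exact hnil (i, j) (List.mem_flatMap.mpr ⟨i, hi, List.mem_map.mpr ⟨j, hj, rfl⟩⟩) hij
  · rw [if_neg hA, if_pos]
    rw [List.filter_eq_nil_iff]
    intro p hp hP
    rcases List.mem_flatMap.mp hp with ⟨i, hi, hpm⟩
    rcases List.mem_map.mp hpm with ⟨j, hj, hpe⟩
    subst hpe
    exact hA (List.any_eq_true.mpr ⟨i, hi, List.any_eq_true.mpr ⟨j, hj, hP⟩⟩)
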